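-- pv_equiv track=rewrite | github.com/ssm8015/QST_GT | python_files/core_utils.py | relabel_coloring_sequential
-- ===== SOURCE A (Python) =====
-- def relabel_coloring_sequential(coloring: dict):
--     mapping, next_c = {}, 0
--     new_col = {}
--     for n in sorted(coloring.keys()):
--         c = coloring[n]
--         if c not in mapping:
--             mapping[c] = next_c
--             next_c += 1
--         new_col[n] = mapping[c]
--     return new_col
-- ===== SOURCE B (Python) =====
-- def relabel_coloring_sequential(coloring: dict):
--     # map each color to the smallest node that carries it
--     rep = {}
--     for n, c in coloring.items():
--         rep[c] = min(rep.get(c, n), n)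
--     # rank colors by their representative (minimum) node
--     order = sorted(rep, key=lambda c: rep[c])
--     rank = {c: i for i, c in enumerate(order)}
--     return {n: rank[coloring[n]] for n in sorted(coloring)}
-- ===== Notes on version B (the rewrite author's own statement) =====
-- stated objective: alternative
-- what changed: Instead of scanning the sorted nodes with a first-appearance counter dict, B builds a color-to-minimum-node map in one unsorted pass, sorts only the distinct colors by that representative node to assign ranks 0,1,2,..., and then maps every sorted node to its color's rank.
import Mathlib
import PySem

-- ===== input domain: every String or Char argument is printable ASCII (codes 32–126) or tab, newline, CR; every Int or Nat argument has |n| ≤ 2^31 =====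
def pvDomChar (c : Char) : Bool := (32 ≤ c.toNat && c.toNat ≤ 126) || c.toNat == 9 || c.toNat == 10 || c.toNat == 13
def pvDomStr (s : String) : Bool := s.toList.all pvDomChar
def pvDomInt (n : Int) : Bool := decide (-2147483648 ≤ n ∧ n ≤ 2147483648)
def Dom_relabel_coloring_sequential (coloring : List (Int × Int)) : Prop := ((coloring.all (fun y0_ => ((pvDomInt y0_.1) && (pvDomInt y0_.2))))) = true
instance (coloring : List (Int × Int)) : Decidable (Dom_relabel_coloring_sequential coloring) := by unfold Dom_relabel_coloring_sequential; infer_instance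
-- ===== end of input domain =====

-- B relabels by ranking each distinct color by its minimum node instead of scanning sorted nodes
-- with a first-appearance counter (objective: alternative decomposition; same return value).

-- ===== PORT A =====
-- loop body of A's 'for n in sorted(coloring.keys())' (state: mapping, next_c, new_col)
def pvStepA (d : PySem.Dict Int Int) (st : PySem.Dict Int Int × Int × PySem.Dict Int Int) (n : Int) :
    PySem.Dict Int Int × Int × PySem.Dict Int Int :=
  let c := (d.get? n).getD 0      -- coloring[n]; n comes from keys, so the lookup always succeeds
  let mc := if st.1.contains c then (st.1, st.2.1) else (st.1.insert c st.2.1, st.2.1 + 1)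
  (mc.1, mc.2, st.2.2.insert n (mc.1.getD c 0))

def relabel_coloring_sequential (coloring : List (Int × Int)) : List (Int × Int) :=
  let d : PySem.Dict Int Int := PySem.Dict.mk coloring
  ((PySem.List.sorted d.keys (fun x => x)).foldl (pvStepA d)
      (PySem.Dict.mk [], 0, PySem.Dict.mk [])).2.2.items

-- ===== PORT B =====
def relabel_coloring_sequential_alt (coloring : List (Int × Int)) : List (Int × Int) :=
  let d : PySem.Dict Int Int := PySem.Dict.mk coloring
  -- rep[c] = min(rep.get(c, n), n) over the items, unsorted
  let rep := d.items.foldl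
    (fun (r : PySem.Dict Int Int) p => r.insert p.2 (min (r.getD p.2 p.1) p.1)) (PySem.Dict.mk [])
  -- order = sorted(rep, key=lambda c: rep[c]);  rank = {c: i for i, c in enumerate(order)}
  let order := PySem.List.sorted rep.keys (fun c => rep.getD c 0)
  let rank := (order.zipIdx).foldl
    (fun (r : PySem.Dict Int Int) p => r.insert p.1 (p.2 : Int)) (PySem.Dict.mk [])
  (PySem.List.sorted d.keys (fun x => x)).map (fun n => (n, rank.getD ((d.get? n).getD 0) 0))

-- ===== PRECONDITION & SPEC =====
-- Pre_ excludes association lists with duplicate node keys: they do not represent any Python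
-- dict argument (a dict's keys are unique), so A is never run on them.
def Pre_relabel_coloring_sequential (coloring : List (Int × Int)) : Prop :=
  (coloring.map Prod.fst).Nodup
instance (coloring : List (Int × Int)) : Decidable (Pre_relabel_coloring_sequential coloring) := by
  unfold Pre_relabel_coloring_sequential; infer_instance
def pvWitness_relabel_coloring_sequential : (List (Int × Int)) := [(2, 5), (1, 7), (3, 5)]

def Spec_relabel_coloring_sequential (coloring : List (Int × Int)) (out : List (Int × Int)) : Prop := out = relabel_coloring_sequential_alt coloring
instance (coloring : List (Int × Int)) (out : List (Int × Int)) : Decidable (Spec_relabel_coloring_sequential coloring out) := by unfold Spec_relabel_coloring_sequential; infer_instance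

-- ===== CLAIM (what is proved, stated in full; the proofs are below) =====
def Claim_equal_relabel_coloring_sequential : Prop := ∀ (coloring : List (Int × Int)), Dom_relabel_coloring_sequential coloring → Pre_relabel_coloring_sequential coloring → Spec_relabel_coloring_sequential coloring (relabel_coloring_sequential coloring)

-- ===== LEMMAS AND PROOFS =====

-- B's first pass: the value stored at color c is the running minimum of the first components
-- of the items whose second component is c.
theorem pv_rep_get (l : List (Int × Int)) (r : PySem.Dict Int Int) (c : Int) :
    ((l.foldl (fun (r : PySem.Dict Int Int) p => r.insert p.2 (min (r.getD p.2 p.1) p.1)) r).get? c)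
      = ((l.filter (fun p => p.2 == c)).map Prod.fst).foldl
          (fun o x => some (min (o.getD x) x)) (r.get? c) := by
  induction l generalizing r with
  | nil => rfl
  | cons p t ih =>
    simp only [List.foldl_cons, List.filter_cons]
    by_cases h : p.2 = c
    · simp only [h, beq_self_eq_true, if_pos, List.map_cons, List.foldl_cons]
      rw [ih]
      congr 1
      simp [PySem.Dict.getD_eq_get?_getD]
    · have : (p.2 == c) = false := by simp [h]
      simp only [this, Bool.false_eq_true, ite_false]
      rw [ih]
      congr 1
      rw [PySem.Dict.get?_insert, if_neg (fun hh => h hh.symm)]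

-- a running-minimum fold yields an element of the list that is a lower bound of it
theorem pv_omin_spec (l : List Int) (a : Int) :
    ∃ m, l.foldl (fun o x => some (min (o.getD x) x)) (some a) = some m ∧
      (m = a ∨ m ∈ l) ∧ m ≤ a ∧ ∀ x ∈ l, m ≤ x := by
  induction l generalizing a with
  | nil => exact ⟨a, rfl, Or.inl rfl, le_refl a, by simp⟩
  | cons x t ih =>
    obtain ⟨m, h1, h2, h3, h4⟩ := ih (min a x)
    refine ⟨m, by simpa using h1, ?_, le_trans h3 (min_le_left _ _), ?_⟩
    · rcases h2 with h | h
      · subst h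
        rcases le_total a x with h | h
        · exact Or.inl (by simp [min_eq_left h])
        · exact Or.inr (by simp [min_eq_right h])
      · exact Or.inr (List.mem_cons_of_mem _ h)
    · intro y hy
      rcases List.mem_cons.mp hy with h | h
      · exact h ▸ le_trans h3 (min_le_right _ _)
      · exact h4 y h

-- B's rank dictionary maps each element of a nodup list to its index
theorem pv_rank_get (l : List Int) (k : Nat) (r : PySem.Dict Int Int)
    (hnd : l.Nodup) (hfresh : ∀ x ∈ l, r.contains x = false) (c : Int) :
    ((l.zipIdx k).foldl (fun (r : PySem.Dict Int Int) p => r.insert p.1 (p.2 : Int)) r).get? c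
      = if c ∈ l then some ((k + l.idxOf c : Nat) : Int) else r.get? c := by
  induction l generalizing k r with
  | nil => simp
  | cons x t ih =>
    simp only [List.zipIdx_cons, List.foldl_cons]
    have hnd' := (List.nodup_cons.mp hnd)
    rw [ih _ _ hnd'.2 ?fresh]
    case fresh =>
      intro y hy
      rw [PySem.Dict.contains_insert]
      have : y ≠ x := fun h => hnd'.1 (h ▸ hy)
      simp [this, hfresh y (List.mem_cons_of_mem _ hy)]
    by_cases hc : c = x
    · subst hc
      have : c ∉ t := hnd'.1
      simp [this, List.idxOf_cons_self]
    · by_cases hct : c ∈ t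
      · rw [if_pos hct, if_pos (List.mem_cons.mpr (Or.inr hct))]
        congr 2
        rw [List.idxOf_cons_ne _ (fun h => hc h.symm)]
        omega
      · have hcl : c ∉ x :: t := by simp [hc, hct]
        simp [hct, hcl, PySem.Dict.get?_insert, hc]

-- Set.update only appends new elements
theorem pv_update_suffix {α : Type} [BEq α] (xs : List α) (S : PySem.Set α) :
    ∃ t, PySem.Set.update S xs = S ++ t := by
  induction xs generalizing S with
  | nil => exact ⟨[], by simp [PySem.Set.update]⟩
  | cons x xs ih =>
    obtain ⟨t, ht⟩ := ih (PySem.Set.add S x)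
    by_cases h : S.contains x = true
    · refine ⟨t, ?_⟩
      rw [show PySem.Set.update S (x::xs) = PySem.Set.update (PySem.Set.add S x) xs from rfl, ht]
      simp only [PySem.Set.add, h, if_pos]
    · refine ⟨x :: t, ?_⟩
      rw [show PySem.Set.update S (x::xs) = PySem.Set.update (PySem.Set.add S x) xs from rfl, ht]
      simp only [PySem.Set.add, h, Bool.false_eq_true, ite_false, List.append_assoc,
        List.singleton_append]

-- A's loop, generalized: mapping realizes idxOf into the seen-color list S,
-- next_c is |S|, and fresh node keys make new_col.insert append.
theorem pv_foldA (d : PySem.Dict Int Int) (f : Int → Int)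
    (hf : ∀ n, f n = (d.get? n).getD 0) :
    ∀ (ns : List Int) (m w : PySem.Dict Int Int) (S : List Int),
    (∀ x, m.get? x = if x ∈ S then some ((S.idxOf x : Nat) : Int) else none) →
    (∀ n ∈ ns, w.contains n = false) → ns.Nodup →
    (ns.foldl (pvStepA d) (m, (S.length : Int), w)).2.2.items
      = w.items ++ ns.map (fun n => (n, ((PySem.Set.update S (ns.map f)).idxOf (f n) : Int))) := by
  intro ns
  induction ns with
  | nil => intro m w S hm hw hnd; simp [PySem.Set.update]
  | cons n t ih =>
    intro m w S hm hw hnd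
    have hnd' := List.nodup_cons.mp hnd
    have hfn : (d.get? n).getD 0 = f n := (hf n).symm
    have hcontains : m.contains (f n) = decide (f n ∈ S) := by
      rw [PySem.Dict.contains_eq_isSome_get?, hm]
      by_cases h : f n ∈ S <;> simp [h]
    have hw' : ∀ (v : Int), ∀ n' ∈ t, (w.insert n v).contains n' = false := by
      intro v n' hn'
      rw [PySem.Dict.contains_insert]
      have : n' ≠ n := fun h => hnd'.1 (h ▸ hn')
      simp [this, hw n' (List.mem_cons_of_mem _ hn')]
    have hwitems : ∀ (v : Int), (w.insert n v).items = w.items ++ [(n, v)] :=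
      fun v => PySem.Dict.items_insert_of_not_contains w v (hw n List.mem_cons_self)
    by_cases hc : f n ∈ S
    · -- seen color: mapping unchanged
      have hupd : PySem.Set.update S ((n :: t).map f) = PySem.Set.update S (t.map f) := by
        have : PySem.Set.add S (f n) = S := by
          simp [PySem.Set.add, hc]
        rw [List.map_cons, show PySem.Set.update S (f n :: t.map f) = PySem.Set.update (PySem.Set.add S (f n)) (t.map f) from rfl, this]
      obtain ⟨tt, htt⟩ := pv_update_suffix (t.map f) (S : PySem.Set Int)
      have hidx : (PySem.Set.update S (t.map f)).idxOf (f n) = S.idxOf (f n) := by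
        rw [htt]; exact List.idxOf_append_of_mem hc
      have hlabel : m.getD (f n) 0 = ((S.idxOf (f n) : Nat) : Int) := by
        rw [PySem.Dict.getD_eq_get?_getD, hm, if_pos hc]; rfl
      simp only [List.foldl_cons, pvStepA, hfn, hcontains, hc, decide_true, if_pos]
      rw [ih m (w.insert n (m.getD (f n) 0)) S hm (hw' _) hnd'.2]
      rw [hwitems, hlabel, List.map_cons, hupd, hidx]
      simp
    · -- new color: it is appended to S with index |S|
      have hSc : ¬ (S.contains (f n) = true) := by simp [PySem.Set.add, hc]
      have hupd : PySem.Set.update S ((n :: t).map f) = PySem.Set.update (S ++ [f n]) (t.map f) := by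
        rw [List.map_cons, show PySem.Set.update S (f n :: t.map f) = PySem.Set.update (PySem.Set.add S (f n)) (t.map f) from rfl]
        simp [PySem.Set.add, hc]
      have hidxc : (S ++ [f n]).idxOf (f n) = S.length := by
        rw [List.idxOf_append, if_neg hc]; simp
      have hm' : ∀ x, (m.insert (f n) ((S.length : Nat) : Int)).get? x
          = if x ∈ S ++ [f n] then some (((S ++ [f n]).idxOf x : Nat) : Int) else none := by
        intro x
        rw [PySem.Dict.get?_insert]
        by_cases hx : x = f n
        · subst hx
          rw [if_pos rfl, if_pos (by simp), hidxc]
        · rw [if_neg hx, hm]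
          have hmem : x ∈ S ++ [f n] ↔ x ∈ S := by simp [hx]
          by_cases hxs : x ∈ S
          · rw [if_pos hxs, if_pos (hmem.mpr hxs), List.idxOf_append_of_mem hxs]
          · rw [if_neg hxs, if_neg (fun h => hxs (hmem.mp h))]
      obtain ⟨tt, htt⟩ := pv_update_suffix (t.map f) ((S ++ [f n]) : PySem.Set Int)
      have hidx : (PySem.Set.update (S ++ [f n]) (t.map f)).idxOf (f n) = S.length := by
        rw [htt, List.idxOf_append_of_mem (by simp), hidxc]
      have hlabel : (m.insert (f n) ((S.length : Nat) : Int)).getD (f n) 0 = ((S.length : Nat) : Int) := by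
        rw [PySem.Dict.getD_eq_get?_getD, PySem.Dict.get?_insert, if_pos rfl]; rfl
      have hnext : ((S.length : Nat) : Int) + 1 = (((S ++ [f n]).length : Nat) : Int) := by
        push_cast [List.length_append]; simp
      simp only [List.foldl_cons, pvStepA, hfn, hcontains, hc, decide_false, Bool.false_eq_true, if_false]
      rw [hlabel, hnext]
      rw [ih _ (w.insert n ((S.length : Nat) : Int)) (S ++ [f n]) hm' (hw' _) hnd'.2]
      rw [hwitems, List.map_cons, hupd, hidx]
      simp

-- first-appearance order of the distinct colors along a strictly increasing node list is
-- strictly increasing under any key that picks a minimal carrier node for each color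
theorem pv_update_pairwise (key f : Int → Int) :
    ∀ (ks S : List Int),
    ks.Pairwise (· < ·) →
    S.Pairwise (fun a b => key a < key b) →
    (∀ a ∈ S, ∀ m ∈ ks, key a < m) →
    (∀ c, c ∉ S → c ∈ ks.map f → key c ∈ ks ∧ f (key c) = c) →
    (∀ n ∈ ks, key (f n) ≤ n) →
    (PySem.Set.update S (ks.map f)).Pairwise (fun a b => key a < key b) := by
  intro ks
  induction ks with
  | nil => intro S _ hS _ _ _; simpa [PySem.Set.update] using hS
  | cons n t ih =>
    intro S hp hS hhi hnew hmin
    have hp' := List.pairwise_cons.mp hp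
    by_cases hc : f n ∈ S
    · have hstep : PySem.Set.update S ((n :: t).map f) = PySem.Set.update S (t.map f) := by
        rw [List.map_cons, show PySem.Set.update S (f n :: t.map f) = PySem.Set.update (PySem.Set.add S (f n)) (t.map f) from rfl]
        simp [PySem.Set.add, hc]
      rw [hstep]
      apply ih S hp'.2 hS
      · intro a ha m hm; exact hhi a ha m (List.mem_cons_of_mem _ hm)
      · intro c' hc' hmem
        obtain ⟨hk, hfk⟩ := hnew c' hc' (by rw [List.map_cons]; exact List.mem_cons_of_mem _ hmem)
        refine ⟨?_, hfk⟩
        rcases List.mem_cons.mp hk with h | h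
        · exfalso; rw [h] at hfk; exact hc' (hfk ▸ hc)
        · exact h
      · intro m hm; exact hmin m (List.mem_cons_of_mem _ hm)
    · obtain ⟨hk, hfk⟩ := hnew (f n) hc (by simp)
      have hkeyc : key (f n) = n := by
        rcases List.mem_cons.mp hk with h | h
        · exact h
        · exact absurd (hp'.1 _ h) (not_lt.mpr (hmin n List.mem_cons_self))
      have hstep : PySem.Set.update S ((n :: t).map f) = PySem.Set.update (S ++ [f n]) (t.map f) := by
        rw [List.map_cons, show PySem.Set.update S (f n :: t.map f) = PySem.Set.update (PySem.Set.add S (f n)) (t.map f) from rfl]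
        simp [PySem.Set.add, hc]
      rw [hstep]
      apply ih (S ++ [f n]) hp'.2
      · rw [List.pairwise_append]
        exact ⟨hS, List.pairwise_singleton _ _, by
          intro a ha b hb
          rw [List.mem_singleton.mp hb, hkeyc]
          exact hhi a ha n List.mem_cons_self⟩
      · intro a ha m hm
        rcases List.mem_append.mp ha with h | h
        · exact hhi a h m (List.mem_cons_of_mem _ hm)
        · rw [List.mem_singleton.mp h, hkeyc]; exact hp'.1 m hm
      · intro c' hc' hmem
        have hc'S : c' ∉ S := fun h => hc' (List.mem_append.mpr (Or.inl h))
        have hc'c : c' ≠ f n := fun h => hc' (List.mem_append.mpr (Or.inr (by simp [h])))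
        obtain ⟨hk', hfk'⟩ := hnew c' hc'S (by rw [List.map_cons]; exact List.mem_cons_of_mem _ hmem)
        refine ⟨?_, hfk'⟩
        rcases List.mem_cons.mp hk' with h | h
        · exfalso; rw [h] at hfk'; exact hc'c hfk'.symm
        · exact h
      · intro m hm; exact hmin m (List.mem_cons_of_mem _ hm)

-- main equivalence on lists with unique node keys
theorem pv_main (coloring : List (Int × Int))
    (hpre : (coloring.map Prod.fst).Nodup) :
    relabel_coloring_sequential coloring = relabel_coloring_sequential_alt coloring := by
  have hkeysnd : (PySem.Dict.mk coloring).keys.Nodup := by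
    simpa [PySem.Dict.keys] using hpre
  set d : PySem.Dict Int Int := PySem.Dict.mk coloring with hddef
  set f : Int → Int := fun n => (d.get? n).getD 0 with hfdef
  set ks : List Int := PySem.List.sorted d.keys (fun x => x) with hksdef
  set rep : PySem.Dict Int Int := coloring.foldl
      (fun (r : PySem.Dict Int Int) p => r.insert p.2 (min (r.getD p.2 p.1) p.1))
      (PySem.Dict.mk []) with hrepdef
  set key : Int → Int := fun c => rep.getD c 0 with hkeydef
  set O : List Int := PySem.Set.update [] (ks.map f) with hOdef
  have hitems : d.items = coloring := rfl
  have hperm : ks.Perm d.keys := PySem.List.sorted_perm _ _ _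
  have hksnd : ks.Nodup := hperm.nodup_iff.mpr hkeysnd
  have hksle : ks.Pairwise (fun a b => a ≤ b) := by
    simpa using PySem.List.sorted_pairwise d.keys (fun x => x)
  have hkslt : ks.Pairwise (· < ·) :=
    (hksle.and hksnd).imp (fun h => lt_of_le_of_ne h.1 h.2)
  -- node/color bookkeeping
  have hget : ∀ n c : Int, (n, c) ∈ coloring → d.get? n = some c := by
    intro n c h
    exact PySem.Dict.get?_of_mem_items d h hkeysnd
  have hfval : ∀ n c : Int, (n, c) ∈ coloring → f n = c := by
    intro n c h; rw [hfdef]; simp [hget n c h]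
  have hmemkeys : ∀ n : Int, n ∈ d.keys ↔ ∃ c, (n, c) ∈ coloring := by
    intro n
    constructor
    · intro h
      obtain ⟨p, hp, hp1⟩ := List.mem_map.mp h
      exact ⟨p.2, by rw [← hp1]; simpa using hp⟩
    · intro ⟨c, hc⟩
      exact List.mem_map.mpr ⟨(n, c), hc, rfl⟩
  have hnodes_mem : ∀ c x : Int,
      x ∈ (coloring.filter (fun p => p.2 == c)).map Prod.fst ↔ (x, c) ∈ coloring := by
    intro c x
    constructor
    · intro h
      obtain ⟨p, hp, hp1⟩ := List.mem_map.mp h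
      have := List.mem_filter.mp hp
      have h2 : p.2 = c := by simpa using this.2
      have : p = (x, c) := by
        cases p; simp_all
      rw [← this]; exact (List.mem_filter.mp hp).1
    · intro h
      exact List.mem_map.mpr ⟨(x, c), List.mem_filter.mpr ⟨h, by simp⟩, rfl⟩
  -- rep stores, for each present color, a minimal node carrying it
  have hrepmin : ∀ n c : Int, (n, c) ∈ coloring →
      (key c, c) ∈ coloring ∧ key c ≤ n := by
    intro n c hnc
    have hrepget := pv_rep_get coloring (PySem.Dict.mk []) c
    have hn : n ∈ (coloring.filter (fun p => p.2 == c)).map Prod.fst := (hnodes_mem c n).mpr hnc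
    obtain ⟨x, rest, hxr⟩ := List.exists_cons_of_ne_nil (List.ne_nil_of_mem hn)
    rw [hxr] at hrepget
    simp only [List.foldl_cons] at hrepget
    rw [show (PySem.Dict.mk ([] : List (Int × Int))).get? c = none from rfl] at hrepget
    simp only [Option.getD_none, min_self] at hrepget
    obtain ⟨m, hm1, hm2, hm3, hm4⟩ := pv_omin_spec rest x
    have hget?c : rep.get? c = some m := by
      rw [hrepdef]
      calc _ = _ := hrepget
      _ = some m := hm1
    have hkeyc : key c = m := by
      rw [hkeydef]; simp [PySem.Dict.getD_eq_get?_getD, hget?c]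
    have hmmem : m ∈ (coloring.filter (fun p => p.2 == c)).map Prod.fst := by
      rw [hxr]
      rcases hm2 with h | h
      · exact h ▸ List.mem_cons_self
      · exact List.mem_cons_of_mem _ h
    have hmle : ∀ y ∈ (coloring.filter (fun p => p.2 == c)).map Prod.fst, m ≤ y := by
      intro y hy
      rw [hxr] at hy
      rcases List.mem_cons.mp hy with h | h
      · exact h ▸ hm3
      · exact hm4 y h
    exact ⟨hkeyc ▸ (hnodes_mem c (key c)).mp (hkeyc ▸ hmmem), hkeyc ▸ hmle n hn⟩
  -- hypotheses of pv_update_pairwise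
  have hnew : ∀ c : Int, c ∉ ([] : List Int) → c ∈ ks.map f → key c ∈ ks ∧ f (key c) = c := by
    intro c _ hc
    obtain ⟨n, hn, hfn⟩ := List.mem_map.mp hc
    have hnc : (n, c) ∈ coloring := by
      obtain ⟨c', hc'⟩ := (hmemkeys n).mp (hperm.mem_iff.mp hn)
      rwa [← hfn, hfval n c' hc']
    obtain ⟨hmem, _⟩ := hrepmin n c hnc
    refine ⟨hperm.mem_iff.mpr ((hmemkeys (key c)).mpr ⟨c, hmem⟩), hfval _ c hmem⟩
  have hmin : ∀ n ∈ ks, key (f n) ≤ n := by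
    intro n hn
    obtain ⟨c', hc'⟩ := (hmemkeys n).mp (hperm.mem_iff.mp hn)
    rw [hfval n c' hc']
    exact (hrepmin n c' hc').2
  have hOpairwise : O.Pairwise (fun a b => key a < key b) :=
    pv_update_pairwise key f ks [] hkslt (by simp) (by simp) hnew hmin
  -- O is exactly the distinct colors, i.e. a permutation of rep's keys
  have hOof : O = PySem.Set.ofList (ks.map f) := by
    rw [hOdef, PySem.Set.ofList_eq_foldl]; rfl
  have hOnd : O.Nodup := by rw [hOof]; exact PySem.Set.nodup_ofList _
  have hrepkeys : rep.keys = PySem.Set.ofList (coloring.map (fun p => p.2)) := by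
    rw [hrepdef]
    rw [PySem.Dict.keys_foldl_insert_key coloring (fun p => p.2)
      (fun r p => min (r.getD p.2 p.1) p.1) (PySem.Dict.mk [])]
    rw [PySem.Set.ofList_eq_foldl]; rfl
  have hrepnd : rep.keys.Nodup := by
    rw [hrepkeys]; exact PySem.Set.nodup_ofList _
  have hmemO : ∀ c, c ∈ O ↔ c ∈ ks.map f := by
    intro c; rw [hOof]; exact PySem.Set.mem_ofList _ c
  have hcolors : ∀ c, c ∈ ks.map f ↔ c ∈ coloring.map (fun p => p.2) := by
    intro c
    constructor
    · intro h
      obtain ⟨n, hn, hfn⟩ := List.mem_map.mp h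
      obtain ⟨c', hc'⟩ := (hmemkeys n).mp (hperm.mem_iff.mp hn)
      have : (n, c) ∈ coloring := by rwa [← hfn, hfval n c' hc']
      exact List.mem_map.mpr ⟨(n, c), this, rfl⟩
    · intro h
      obtain ⟨p, hp, hp2⟩ := List.mem_map.mp h
      refine List.mem_map.mpr ⟨p.1, hperm.mem_iff.mpr ((hmemkeys p.1).mpr ⟨p.2, by simpa using hp⟩), ?_⟩
      rw [hfval p.1 p.2 (by simpa using hp)]; exact hp2
  have hOperm : O.Perm rep.keys := by
    rw [List.perm_ext_iff_of_nodup hOnd hrepnd]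
    intro c
    rw [hmemO, hcolors, hrepkeys, PySem.Set.mem_ofList]
  have horder : PySem.List.sorted rep.keys (fun c => rep.getD c 0) = O :=
    PySem.List.sorted_eq_of_perm_of_pairwise_lt rep.keys O _ hOperm (by
      simpa [hkeydef] using hOpairwise)
  -- A's side: labels are indices into O
  have hA : relabel_coloring_sequential coloring
      = ks.map (fun n => (n, ((O.idxOf (f n) : Nat) : Int))) := by
    have := pv_foldA d f (fun n => rfl) ks (PySem.Dict.mk []) (PySem.Dict.mk []) []
      (by intro x
          rw [show (PySem.Dict.mk ([] : List (Int × Int))).get? x = none from rfl]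
          simp) (by intro n _; rfl) hksnd
    simpa [relabel_coloring_sequential, hOdef] using this
  -- B's side: rank realizes the same indices
  have hB : relabel_coloring_sequential_alt coloring
      = ks.map (fun n => (n, ((O.idxOf (f n) : Nat) : Int))) := by
    rw [relabel_coloring_sequential_alt]
    show (PySem.List.sorted d.keys (fun x => x)).map _ = _
    rw [show coloring.foldl
        (fun (r : PySem.Dict Int Int) p => r.insert p.2 (min (r.getD p.2 p.1) p.1))
        (PySem.Dict.mk []) = rep from rfl]
    rw [horder]
    apply List.map_congr_left
    intro n hn
    have hfO : f n ∈ O := (hmemO (f n)).mpr (List.mem_map.mpr ⟨n, hn, rfl⟩)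
    have := pv_rank_get O 0 (PySem.Dict.mk []) hOnd (by intro x _; rfl) (f n)
    rw [if_pos hfO] at this
    rw [PySem.Dict.getD_eq_get?_getD]
    rw [show ((d.get? n).getD 0) = f n from rfl, this]
    simp
  rw [hA, hB]

-- ===== VERDICT (by name: the statement is the Claim_ definition above) =====
theorem relabel_coloring_sequential_spec : Claim_equal_relabel_coloring_sequential := by
  intro coloring _ hpre
  exact pv_main coloring hpre
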